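-- pv_equiv track=rewrite | github.com/alltheplaces/alltheplaces | locations/spiders/mcdonalds_sk.py | store_hours
-- ===== SOURCE A (Python) =====
-- def store_hours(data):
--     day = ["Mo", "Tu", "We", "Th", "Fr", "Sa", "Su"]
--     day_groups = []
--     this_day_group = {}
--     day_hours = data.split(",")
--     weekday = 0
--     for day_hour in day_hours:
--         hours = ""
--
--         short_day = day[weekday]
--         hours = day_hour.strip()
--         if not this_day_group:
--             this_day_group = {
--                 "from_day": short_day,
--                 "to_day": short_day,
--                 "hours": hours,
--             }
--
--         elif hours == this_day_group["hours"]: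
--             this_day_group["to_day"] = short_day
--
--         elif hours != this_day_group["hours"]:
--             day_groups.append(this_day_group)
--             this_day_group = {
--                 "from_day": short_day,
--                 "to_day": short_day,
--                 "hours": hours,
--             }
--
--         weekday = weekday + 1
--
--     day_groups.append(this_day_group)
--
--     if not day_groups:
--         return None
--     opening_hours = ""
--     if len(day_groups) == 1 and day_groups[0]["hours"] in (
--         "00:00-23:59",
--         "00:00-00:00",
--     ):
--         opening_hours = "24/7"
--     else:
--         for day_group in day_groups:
--             if day_group["from_day"] == day_group["to_day"]:
--                 opening_hours += "{from_day} {hours}; ".format(**day_group)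
--             else:
--                 opening_hours += "{from_day}-{to_day} {hours}; ".format(**day_group)
--         opening_hours = opening_hours[:-2]
--
--     return opening_hours
-- ===== SOURCE B (Python) =====
-- def store_hours(data):
--     day = ["Mo", "Tu", "We", "Th", "Fr", "Sa", "Su"]
--     hs = [p.strip() for p in data.split(",")]
--     # Stateless boundary detection: a day starts a group iff its hours differ from the
--     # previous day's, ends one iff they differ from the next day's; zip pairs them up.
--     starts = [(i, h) for i, (h, prev) in enumerate(zip(hs, [None] + hs)) if h != prev]
--     ends = [i for i, (h, nxt) in enumerate(zip(hs, hs[1:] + [None])) if h != nxt]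
--     if len(starts) == 1 and starts[0][1] in ("00:00-23:59", "00:00-00:00"):
--         return "24/7"
--     pieces = []
--     for (a, h), b in zip(starts, ends):
--         if a == b:
--             pieces.append("%s %s" % (day[a], h))
--         else:
--             pieces.append("%s-%s %s" % (day[a], day[b], h))
--     return "; ".join(pieces)
-- ===== Notes on version B (the rewrite author's own statement) =====
-- stated objective: alternative
-- what changed: Replaces A's single stateful merge loop (carrying a current-group dict and a weekday counter) by stateless boundary detection: each day is marked a group start/end iff its hours differ from its neighbour's via two zip-with-shifted-list filter passes, and the start and end lists are then zipped and formatted with a separator join.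
-- outside the precondition, e.g. on store_hours('1,2,3,4,5,6,7,8'): A raises IndexError, B raises IndexError
import Mathlib
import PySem

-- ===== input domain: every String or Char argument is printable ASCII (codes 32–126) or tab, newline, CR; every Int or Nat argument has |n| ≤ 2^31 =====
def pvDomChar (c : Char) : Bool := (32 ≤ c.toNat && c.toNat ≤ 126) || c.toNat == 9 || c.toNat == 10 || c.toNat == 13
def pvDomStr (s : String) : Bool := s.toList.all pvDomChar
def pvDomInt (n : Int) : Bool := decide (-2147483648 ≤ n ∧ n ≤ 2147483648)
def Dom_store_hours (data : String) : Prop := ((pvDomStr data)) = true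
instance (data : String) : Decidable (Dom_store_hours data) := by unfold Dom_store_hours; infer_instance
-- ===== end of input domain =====

-- B replaces A's stateful merge loop by stateless boundary detection: each day is a group
-- start/end iff its hours differ from its neighbour's (two zip-filter passes), then the
-- starts and ends lists are zipped and formatted; objective: alternative decomposition.

-- ===== PORT A =====
-- A's dict {"from_day","to_day","hours"} is the triple (from_day, to_day, hours).
-- The loop state is (day_groups, this_day_group? , weekday), wrapped in Option: none = IndexError from day[weekday].
def storeHoursStepA (day : List String)
    (st : Option (List (String × String × String) × Option (String × String × String) × Int))
    (day_hour : String) :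
    Option (List (String × String × String) × Option (String × String × String) × Int) :=
  match st with
  | none => none
  | some (groups, cur, weekday) =>
    match PySem.List.pyGet? day weekday with
    | none => none
    | some short_day =>
      let hours := PySem.Str.strip day_hour
      match cur with
      | none => some (groups, some (short_day, short_day, hours), weekday + 1)
      | some (fd, td, h) =>
        if hours == h then some (groups, some (fd, short_day, h), weekday + 1)
        else some (groups ++ [(fd, td, h)], some (short_day, short_day, hours), weekday + 1)

def store_hours (data : String) : Option String :=
  let day : List String := ["Mo", "Tu", "We", "Th", "Fr", "Sa", "Su"]
  let day_hours := (PySem.Str.split? data ",").getD []   -- sep "," ≠ "": split? is always some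
  match day_hours.foldl (storeHoursStepA day) (some ([], none, 0)) with
  | none => none
  | some (groups, cur, _) =>
    let day_groups := groups ++ (match cur with | none => [] | some g => [g])
    if day_groups = [] then none
    else if day_groups.length == 1
        && ((day_groups.headD ("", "", "")).2.2 == "00:00-23:59"
            || (day_groups.headD ("", "", "")).2.2 == "00:00-00:00") then
      some "24/7"
    else
      let opening_hours := day_groups.foldl
        (fun acc g =>
          if g.1 == g.2.1 then acc ++ g.1 ++ " " ++ g.2.2 ++ "; "
          else acc ++ g.1 ++ "-" ++ g.2.1 ++ " " ++ g.2.2 ++ "; ") ""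
      some (PySem.Str.slice opening_hours none (some (-2)))

-- ===== PORT B =====
-- one formatted piece per (start index, hours, end index); none = IndexError from day[...]
def fmtPieceB (day : List String) (a : Int) (h : String) (b : Int) : Option String :=
  if a == b then
    (PySem.List.pyGet? day a).map (fun da => da ++ " " ++ h)
  else
    match PySem.List.pyGet? day a, PySem.List.pyGet? day b with
    | some da, some db => some (da ++ "-" ++ db ++ " " ++ h)
    | _, _ => none

-- Python's heterogeneous sentinel lists [None] + hs and hs[1:] + [None] are encoded with
-- Option String (None = none, an hours string h = some h); zip truncates in both languages.
def store_hours_alt (data : String) : Option String :=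
  let day : List String := ["Mo", "Tu", "We", "Th", "Fr", "Sa", "Su"]
  let hs := ((PySem.Str.split? data ",").getD []).map PySem.Str.strip   -- sep "," ≠ "": split? is always some
  let starts := ((PySem.List.enumerate (hs.zip (none :: hs.map some)) 0).filter
      (fun p => some p.2.1 != p.2.2)).map (fun p => (p.1, p.2.1))
  let ends := ((PySem.List.enumerate
      (hs.zip ((PySem.List.slice hs (some 1) none).map some ++ [none])) 0).filter
      (fun p => some p.2.1 != p.2.2)).map (fun p => p.1)
  if starts.length == 1
      && ((starts.headD (0, "")).2 == "00:00-23:59"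
          || (starts.headD (0, "")).2 == "00:00-00:00") then
    some "24/7"
  else
    match (starts.zip ends).mapM (fun q => fmtPieceB day q.1.1 q.1.2 q.2) with
    | none => none
    | some pieces => some (PySem.Str.join "; " pieces)

-- ===== PRECONDITION & SPEC =====
-- Pre_ excludes the inputs with more than 7 comma-separated fields, on which Python A raises IndexError (day[weekday]).
def Pre_store_hours (data : String) : Prop :=
  ((PySem.Str.split? data ",").getD []).length ≤ 7
instance (data : String) : Decidable (Pre_store_hours data) := by unfold Pre_store_hours; infer_instance

def pvWitness_store_hours : String := "08:00-17:00, 08:00-17:00, 10:00-12:00"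

def Spec_store_hours (data : String) (out : Option String) : Prop := out = store_hours_alt data
instance (data : String) (out : Option String) : Decidable (Spec_store_hours data out) := by unfold Spec_store_hours; infer_instance

-- ===== CLAIM (what is proved, stated in full; the proofs are below) =====
def Claim_equal_store_hours : Prop := ∀ (data : String), Dom_store_hours data → Pre_store_hours data → Spec_store_hours data (store_hours data)

-- ===== LEMMAS AND PROOFS =====

-- The shared run structure over the RAW fields: maximal consecutive groups of equal
-- stripped hours, as (first index, last index, hours); (a,b,h) is the run in progress.
def pvRunsGo (l : List String) (a b : Int) (h : String) : List (Int × Int × String) :=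
  match l with
  | [] => [(a, b, h)]
  | x :: rest =>
    let s := PySem.Str.strip x
    if s = h then pvRunsGo rest a (b + 1) h
    else (a, b, h) :: pvRunsGo rest (b + 1) (b + 1) s

-- the same runs over an already-stripped list (B's hs)
def pvRunsD (l : List String) (a b : Int) (h : String) : List (Int × Int × String) :=
  match l with
  | [] => [(a, b, h)]
  | x :: rest =>
    if x = h then pvRunsD rest a (b + 1) h
    else (a, b, h) :: pvRunsD rest (b + 1) (b + 1) x

def pvDay : List String := ["Mo", "Tu", "We", "Th", "Fr", "Sa", "Su"]

-- name a run's indices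
def pvNm (r : Int × Int × String) : String × String × String :=
  (PySem.List.pyGetD pvDay r.1 "", PySem.List.pyGetD pvDay r.2.1 "", r.2.2)

lemma pvRunsGo_eq_runsD (l : List String) (a b : Int) (h : String) :
    pvRunsGo l a b h = pvRunsD (l.map PySem.Str.strip) a b h := by
  induction l generalizing a b h with
  | nil => rfl
  | cons x rest ih =>
    simp only [pvRunsGo, pvRunsD, List.map_cons]
    split <;> simp [ih]

lemma pvDay_get (i : Int) (h0 : 0 ≤ i) (h7 : i < 7) :
    PySem.List.pyGet? pvDay i = some (PySem.List.pyGetD pvDay i "") := by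
  interval_cases i <;> decide

lemma pvDay_inj (i j : Int) (hi0 : 0 ≤ i) (hi7 : i < 7) (hj0 : 0 ≤ j) (hj7 : j < 7) :
    (PySem.List.pyGetD pvDay i "" = PySem.List.pyGetD pvDay j "") ↔ i = j := by
  interval_cases i <;> interval_cases j <;> simp <;> decide

lemma pvRunsGo_ne_nil (l : List String) (a b : Int) (h : String) :
    pvRunsGo l a b h ≠ [] := by
  induction l generalizing a b h with
  | nil => simp [pvRunsGo]
  | cons x rest ih =>
    simp only [pvRunsGo]
    split <;> simp [ih]

lemma pvRunsGo_bounds (l : List String) (a b : Int) (h : String) (ha : 0 ≤ a) (hab : a ≤ b) :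
    ∀ r ∈ pvRunsGo l a b h, 0 ≤ r.1 ∧ r.1 ≤ r.2.1 ∧ r.2.1 ≤ b + l.length := by
  induction l generalizing a b h with
  | nil => intro r hr; simp [pvRunsGo] at hr; subst hr; simp; omega
  | cons x rest ih =>
    intro r hr
    simp only [pvRunsGo] at hr
    split at hr
    · have := ih a (b+1) h ha (by omega) r hr
      simp at *; omega
    · rcases List.mem_cons.mp hr with h1 | h1
      · subst h1; simp; omega
      · have := ih (b+1) (b+1) _ (by omega) le_rfl r h1
        simp at *; omega

lemma pvFoldA (l : List String) (gs : List (String × String × String)) (a b : Int) (h : String)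
    (ha : 0 ≤ a) (hab : a ≤ b) (hlen : b + 1 + l.length ≤ 7) :
    ∃ gs' c, l.foldl (storeHoursStepA pvDay) (some (gs, some (pvNm (a, b, h)), b + 1))
        = some (gs', some c, b + 1 + l.length)
      ∧ gs' ++ [c] = gs ++ (pvRunsGo l a b h).map pvNm := by
  induction l generalizing gs a b h with
  | nil => exact ⟨gs, pvNm (a, b, h), by simp, by simp [pvRunsGo]⟩
  | cons x rest ih =>
    rw [List.foldl_cons]
    have hget : PySem.List.pyGet? pvDay (b + 1)
        = some (PySem.List.pyGetD pvDay (b + 1) "") := by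
      apply pvDay_get <;> [omega; (simp at hlen; omega)]
    rw [show storeHoursStepA pvDay (some (gs, some (pvNm (a, b, h)), b + 1)) x
        = (if PySem.Str.strip x == h then
             some (gs, some (pvNm (a, b + 1, h)), b + 1 + 1)
           else
             some (gs ++ [pvNm (a, b, h)], some (pvNm (b + 1, b + 1, PySem.Str.strip x)),
                   b + 1 + 1)) from by
      simp only [storeHoursStepA, hget, pvNm]]
    by_cases hs : PySem.Str.strip x = h
    · rw [if_pos (by simpa using hs)]
      obtain ⟨gs', c, h1, h2⟩ := ih gs a (b+1) h ha (by omega) (by simp at hlen ⊢; omega)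
      refine ⟨gs', c, by rw [h1]; congr 2; simp; omega, ?_⟩
      rw [h2]; congr 1
      simp [pvRunsGo, hs]
    · rw [if_neg (by simpa using hs)]
      obtain ⟨gs', c, h1, h2⟩ :=
        ih (gs ++ [pvNm (a, b, h)]) (b+1) (b+1) (PySem.Str.strip x) (by omega) le_rfl
          (by simp at hlen ⊢; omega)
      refine ⟨gs', c, by rw [h1]; congr 2; simp; omega, ?_⟩
      rw [h2]
      simp only [pvRunsGo, if_neg hs, List.map_cons, List.append_assoc, List.cons_append,
        List.nil_append]

-- B's start markers: the filtered enumerate over (value, previous value) pairs lists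
-- exactly (first index, hours) of each run after the one in progress.
lemma pvStartsB (l : List String) (a b : Int) (h : String) :
    (pvRunsD l a b h).map (fun r => (r.1, r.2.2))
      = (a, h) :: ((PySem.List.enumerate (l.zip (some h :: l.map some)) (b + 1)).filter
          (fun p => some p.2.1 != p.2.2)).map (fun p => (p.1, p.2.1)) := by
  induction l generalizing a b h with
  | nil => simp [pvRunsD, PySem.List.enumerate_nil]
  | cons x rest ih =>
    simp only [List.map_cons, List.zip_cons_cons, PySem.List.enumerate_cons, List.filter_cons]
    by_cases hx : x = h
    · subst hx
      rw [show (some x != some x) = false from by simp,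
        show pvRunsD (x :: rest) a b x = pvRunsD rest a (b + 1) x from by simp [pvRunsD]]
      simpa using ih a (b + 1) x
    · rw [show (some x != some h) = true from by simp [hx]]
      simp only [pvRunsD, if_neg hx, List.map_cons]
      rw [ih (b + 1) (b + 1) x]
      rfl

-- B's end markers: the filtered enumerate over (value, next value) pairs lists exactly
-- the last index of every run (independent of the in-progress run's start a).
lemma pvEndsB (l : List String) (x : String) (a b : Int) :
    (pvRunsD l a b x).map (fun r => r.2.1)
      = ((PySem.List.enumerate ((x :: l).zip (l.map some ++ [none])) b).filter
          (fun p => some p.2.1 != p.2.2)).map (fun p => p.1) := by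
  induction l generalizing x a b with
  | nil =>
    simp [pvRunsD, PySem.List.enumerate_cons, PySem.List.enumerate_nil]
  | cons y rest ih =>
    simp only [List.map_cons, List.cons_append, List.zip_cons_cons,
      PySem.List.enumerate_cons, List.filter_cons]
    by_cases hy : y = x
    · subst hy
      rw [show (some y != some y) = false from by simp,
        show pvRunsD (y :: rest) a b y = pvRunsD rest a (b + 1) y from by simp [pvRunsD]]
      simpa using ih y a (b + 1)
    · rw [show (some x != some y) = true from by simp [Ne.symm hy]]
      simp only [pvRunsD, if_neg hy, List.map_cons]
      rw [ih y (b + 1) (b + 1)]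
      rfl

lemma pvSplitGo_ne_nil (sep : List Char) : ∀ (fuel : Nat) (s cur : List Char)
    (acc : List (List Char)), PySem.Chars.splitOn.go sep fuel s cur acc ≠ [] := by
  intro fuel
  induction fuel with
  | zero => intro s cur acc; unfold PySem.Chars.splitOn.go; simp
  | succ n ih =>
    intro s cur acc
    unfold PySem.Chars.splitOn.go
    match s with
    | [] => simp
    | c :: rest =>
      dsimp only
      split
      · exact ih _ _ _
      · exact ih _ _ _

lemma pvSplit_ne_nil (data : String) : (PySem.Str.split? data ",").getD [] ≠ [] := by
  simp only [PySem.Str.split?]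
  simp only [show ("," : String).toList = [','] from rfl]
  simp [PySem.Chars.split?, PySem.Chars.splitOn]
  exact pvSplitGo_ne_nil _ _ _ _ _

lemma pvFoldStr (ps : List String) (acc : String) :
    (ps.foldl (fun acc p => acc ++ p ++ "; ") acc).toList
      = acc.toList ++ (ps.map (fun p => p.toList ++ [';', ' '])).flatten := by
  induction ps generalizing acc with
  | nil => simp
  | cons p rest ih =>
    rw [List.foldl_cons, ih]
    simp [String.toList_append, show ("; " : String).toList = [';', ' '] from rfl]

lemma pvFlatten (ps : List (List Char)) (hne : ps ≠ []) :
    (ps.map (fun p => p ++ [';', ' '])).flatten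
      = PySem.Chars.join [';', ' '] ps ++ [';', ' '] := by
  induction ps with
  | nil => cases hne rfl
  | cons p rest ih =>
    cases rest with
    | nil => simp [PySem.Chars.join_singleton]
    | cons q rt =>
      rw [List.map_cons, List.flatten_cons, ih (by simp), PySem.Chars.join_cons_cons]
      simp

-- join with "; " and concat-then-drop-2 agree on a nonempty list of pieces
lemma pvJoinConcat (ps : List String) (hne : ps ≠ []) :
    PySem.Str.slice
      (ps.foldl (fun acc p => acc ++ p ++ "; ") "") none (some (-2))
      = PySem.Str.join "; " ps := by
  apply String.toList_inj.mp
  rw [PySem.Str.toList_slice, PySem.Chars.slice_eq_listSlice,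
    PySem.List.slice_to_neg_ofNat _ 2 (by omega), pvFoldStr,
    PySem.Str.toList_join, show ("; " : String).toList = [';', ' '] from rfl,
    show ("" : String).toList = [] from rfl, List.nil_append,
    show List.map (fun p => String.toList p ++ [';', ' ']) ps
      = List.map (fun p => p ++ [';', ' ']) (ps.map String.toList) from by
        rw [List.map_map]; rfl,
    pvFlatten _ (by simpa using hne)]
  rw [show (PySem.Chars.join [';', ' '] (List.map String.toList ps) ++ [';', ' ']).length - 2
      = (PySem.Chars.join [';', ' '] (List.map String.toList ps)).length from by
    simp]
  exact List.take_left

lemma pvFmtRun (r : Int × Int × String) (h0 : 0 ≤ r.1) (h1 : r.1 ≤ r.2.1) (h2 : r.2.1 < 7) :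
    fmtPieceB pvDay r.1 r.2.2 r.2.1 = some (if (pvNm r).1 == (pvNm r).2.1
      then (pvNm r).1 ++ " " ++ (pvNm r).2.2
      else (pvNm r).1 ++ "-" ++ (pvNm r).2.1 ++ " " ++ (pvNm r).2.2) := by
  have ga := pvDay_get r.1 h0 (by omega)
  have gb := pvDay_get r.2.1 (by omega) h2
  have hinj := pvDay_inj r.1 r.2.1 h0 (by omega) (by omega) h2
  unfold fmtPieceB pvNm
  by_cases he : r.1 = r.2.1
  · rw [if_pos (by simpa using he), if_pos (by simp [he]), he, gb]
    rfl
  · rw [if_neg (by simpa using he), if_neg (by simp [hinj, he]), ga, gb]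

lemma pvMapM (rs : List (Int × Int × String))
    (hb : ∀ r ∈ rs, 0 ≤ r.1 ∧ r.1 ≤ r.2.1 ∧ r.2.1 < 7) :
    (rs.map (fun r => ((r.1, r.2.2), r.2.1))).mapM
        (fun q => fmtPieceB pvDay q.1.1 q.1.2 q.2)
      = some (rs.map (fun r =>
        if (pvNm r).1 == (pvNm r).2.1 then (pvNm r).1 ++ " " ++ (pvNm r).2.2
        else (pvNm r).1 ++ "-" ++ (pvNm r).2.1 ++ " " ++ (pvNm r).2.2)) := by
  induction rs with
  | nil => rfl
  | cons r rt ih =>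
    obtain ⟨b0, b1, b2⟩ := hb r (List.mem_cons_self ..)
    rw [List.map_cons, List.mapM_cons]
    rw [show fmtPieceB pvDay ((r.1, r.2.2), r.2.1).1.1 ((r.1, r.2.2), r.2.1).1.2
        ((r.1, r.2.2), r.2.1).2 = fmtPieceB pvDay r.1 r.2.2 r.2.1 from rfl,
      pvFmtRun r b0 b1 b2, ih (fun x hx => hb x (List.mem_cons_of_mem _ hx))]
    rfl

lemma pvStepFmt (acc : String) (g : String × String × String) :
    (if g.1 == g.2.1 then acc ++ g.1 ++ " " ++ g.2.2 ++ "; "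
     else acc ++ g.1 ++ "-" ++ g.2.1 ++ " " ++ g.2.2 ++ "; ")
    = acc ++ (if g.1 == g.2.1 then g.1 ++ " " ++ g.2.2
              else g.1 ++ "-" ++ g.2.1 ++ " " ++ g.2.2) ++ "; " := by
  split <;> simp [String.append_assoc]

-- ===== VERDICT (by name: the statement is the Claim_ definition above) =====
theorem store_hours_spec : Claim_equal_store_hours := by
  intro data _ hpre
  unfold Spec_store_hours store_hours store_hours_alt
  dsimp only
  rw [show (["Mo", "Tu", "We", "Th", "Fr", "Sa", "Su"] : List String) = pvDay from rfl]
  obtain ⟨p0, rest, hparts⟩ :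
      ∃ p0 rest, (PySem.Str.split? data ",").getD [] = p0 :: rest :=
    match hsp : (PySem.Str.split? data ",").getD [] with
    | [] => absurd hsp (pvSplit_ne_nil data)
    | p0 :: rest => ⟨p0, rest, rfl⟩
  have hlen7 : (1 : Int) + rest.length ≤ 7 := by
    have := hpre
    unfold Pre_store_hours at this
    rw [hparts] at this
    simp at this
    omega
  rw [hparts]
  -- A's loop reduces to the run list
  rw [List.foldl_cons,
    show storeHoursStepA pvDay (some ([], none, 0)) p0
      = some ([], some (pvNm (0, 0, PySem.Str.strip p0)), 0 + 1) from rfl]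
  obtain ⟨gs', c, hA, hAeq⟩ := pvFoldA rest [] 0 0 (PySem.Str.strip p0) le_rfl le_rfl (by omega)
  rw [hA]
  dsimp only
  -- B's boundary passes reduce to the same run list
  rw [show ((p0 :: rest).map PySem.Str.strip)
      = PySem.Str.strip p0 :: rest.map PySem.Str.strip from rfl]
  simp only [List.map_cons, List.zip_cons_cons, PySem.List.enumerate_cons, List.filter_cons,
    PySem.List.slice_from_one, List.tail_cons]
  rw [show ((some (PySem.Str.strip p0) != (none : Option String))) = true from rfl, if_pos rfl]
  simp only [List.map_cons]
  rw [← pvStartsB (rest.map PySem.Str.strip) 0 0 (PySem.Str.strip p0),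
    ← pvEndsB (rest.map PySem.Str.strip) (PySem.Str.strip p0) 0 0,
    ← pvRunsGo_eq_runsD rest 0 0 (PySem.Str.strip p0)]
  set runs := pvRunsGo rest 0 0 (PySem.Str.strip p0) with hruns
  simp only [List.nil_append] at hAeq
  rw [hAeq]
  obtain ⟨r, rt, hr⟩ : ∃ r rt, runs = r :: rt := by
    match hx : runs with
    | [] => exact absurd hx (pvRunsGo_ne_nil rest 0 0 _)
    | r :: rt => exact ⟨r, rt, rfl⟩
  have hbounds : ∀ x ∈ runs, 0 ≤ x.1 ∧ x.1 ≤ x.2.1 ∧ x.2.1 < 7 := by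
    intro x hx
    have := pvRunsGo_bounds rest 0 0 (PySem.Str.strip p0) le_rfl le_rfl x (hruns ▸ hx)
    omega
  rw [hr]
  rw [if_neg (by simp)]
  simp only [List.map_cons, List.headD_cons, List.length_cons, List.length_map]
  have h22 : (pvNm r).2.2 = r.2.2 := rfl
  rw [h22, show ((fun (r : Int × Int × String) => (r.1, r.2.2)) r).2 = r.2.2 from rfl]
  by_cases hcond : (rt.length + 1 == 1 && (r.2.2 == "00:00-23:59" || r.2.2 == "00:00-00:00")) = true
  · rw [if_pos hcond, if_pos hcond]
  · rw [if_neg hcond, if_neg hcond]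
    rw [show ((fun (r : Int × Int × String) => (r.1, r.2.2)) r :: rt.map (fun r => (r.1, r.2.2))).zip
          ((fun (r : Int × Int × String) => r.2.1) r :: rt.map (fun r => r.2.1))
        = ((r :: rt).map (fun r => (r.1, r.2.2))).zip ((r :: rt).map (fun r => r.2.1)) from by
      simp, List.zip_map']
    rw [show ((r :: rt).map fun x => ((x.1, x.2.2), x.2.1))
        = (r :: rt).map (fun r => ((r.1, r.2.2), r.2.1)) from rfl]
    rw [pvMapM (r :: rt) (hr ▸ hbounds)]
    rw [show ∀ (l : List (String × String × String)) (acc : String),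
        l.foldl (fun acc g =>
          if g.1 == g.2.1 then acc ++ g.1 ++ " " ++ g.2.2 ++ "; "
          else acc ++ g.1 ++ "-" ++ g.2.1 ++ " " ++ g.2.2 ++ "; ") acc
        = (l.map (fun g => if g.1 == g.2.1 then g.1 ++ " " ++ g.2.2
            else g.1 ++ "-" ++ g.2.1 ++ " " ++ g.2.2)).foldl
            (fun acc p => acc ++ p ++ "; ") acc from by
      intro l
      induction l with
      | nil => intro acc; rfl
      | cons g gt ihg =>
        intro acc
        rw [List.foldl_cons, pvStepFmt, ihg, List.map_cons, List.foldl_cons]]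
    dsimp only
    simp only [List.map_map, List.map_cons]
    rw [pvJoinConcat _ (by simp)]
    rfl
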